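-- pv_equiv track=rewrite | github.com/snowraincloud/leetcode | week_contest/186/5393.py | maxScoreAnother
-- ===== SOURCE A (Python) =====
-- from typing import List
--
-- def maxScoreAnother(cardPoints: List[int], k: int) -> int:
--     if len(cardPoints) == k:
--         return sum(cardPoints)
--     elif k == 1:
--         return cardPoints[0] if cardPoints[0] >= cardPoints[-1] else cardPoints[-1]
--     pre_sum = [0]
--     for i in range(0, len(cardPoints)):
--         pre_sum.append(pre_sum[-1] + cardPoints[i])
--     min_sum = 0x7fffffff
--     for i in range(len(cardPoints) - k, len(cardPoints)+1):
--         if pre_sum[i] - pre_sum[i - len(cardPoints) + k] < min_sum: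
--             min_sum = pre_sum[i] - pre_sum[i - len(cardPoints) + k]
--     return pre_sum[-1] - min_sum
-- ===== SOURCE B (Python) =====
-- from typing import List
--
-- def maxScoreAnother(cardPoints: List[int], k: int) -> int:
--     cur = sum(cardPoints[:k])
--     best = cur
--     for i in range(1, k + 1):
--         cur += cardPoints[-i] - cardPoints[k - i]
--         best = max(best, cur)
--     return best
-- ===== Notes on version B (the rewrite author's own statement) =====
-- stated objective: simpler
-- what changed: B slides the split between left-taken and right-taken cards, maintaining the taken-k sum directly with one running update per step, instead of A's prefix-sum table plus a minimum-complement-window scan with a 0x7fffffff sentinel and special cases for k==len and k==1.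
-- intended difference: When 0 <= k < len, k != 1 and every contiguous complement window of length len-k sums to more than 0x7fffffff, A's sentinel is never beaten and it returns total-0x7fffffff (e.g. 1 on ([2147483648], 0)); B returns the true maximum taken sum (0 there), which is the intended value. — e.g. on maxScoreAnother([2147483648], 0): A returns 1, B returns 0
-- outside the precondition, e.g. on maxScoreAnother([1, 2], -1): A returns -2147483644, B returns 1; on maxScoreAnother([1, 2], 5): A raises IndexError, B raises IndexError
import Mathlib
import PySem

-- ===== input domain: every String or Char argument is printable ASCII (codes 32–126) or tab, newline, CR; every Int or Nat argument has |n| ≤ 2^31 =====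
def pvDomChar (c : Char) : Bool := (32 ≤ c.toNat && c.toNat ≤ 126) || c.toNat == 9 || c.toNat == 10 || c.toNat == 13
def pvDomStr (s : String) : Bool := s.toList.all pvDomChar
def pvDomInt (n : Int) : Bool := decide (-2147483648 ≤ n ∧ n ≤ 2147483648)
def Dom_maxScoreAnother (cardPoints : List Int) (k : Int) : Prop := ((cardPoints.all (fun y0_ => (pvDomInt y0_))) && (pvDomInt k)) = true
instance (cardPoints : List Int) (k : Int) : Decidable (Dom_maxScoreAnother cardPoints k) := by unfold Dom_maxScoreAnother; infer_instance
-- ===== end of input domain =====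

-- B replaces A's prefix-sum table + min-complement-window scan (with sentinel and k==len / k==1
-- special cases) by one running taken-sum slid over the left/right split; simpler decomposition.

-- ===== PORT A =====
def maxScoreAnother (cardPoints : List Int) (k : Int) : Int :=
  if (cardPoints.length : Int) = k then cardPoints.sum
  else if k = 1 then
    let a := PySem.List.pyGetD cardPoints 0 0
    let b := PySem.List.pyGetD cardPoints (-1) 0
    if a ≥ b then a else b
  else
    let n : Int := cardPoints.length
    let preSum : List Int := (PySem.List.pyRange 0 n 1).foldl
      (fun ps i => ps ++ [PySem.List.pyGetD ps (-1) 0 + PySem.List.pyGetD cardPoints i 0]) [0]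
    let minSum : Int := (PySem.List.pyRange (n - k) (n + 1) 1).foldl
      (fun m i =>
        if PySem.List.pyGetD preSum i 0 - PySem.List.pyGetD preSum (i - n + k) 0 < m then
          PySem.List.pyGetD preSum i 0 - PySem.List.pyGetD preSum (i - n + k) 0
        else m) 2147483647
    PySem.List.pyGetD preSum (-1) 0 - minSum

-- ===== PORT B =====
def maxScoreAnother_alt (cardPoints : List Int) (k : Int) : Int :=
  let cur0 : Int := (PySem.List.slice cardPoints none (some k)).sum
  let res := (PySem.List.pyRange 1 (k + 1) 1).foldl
    (fun (st : Int × Int) i =>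
      let cur := st.1 + PySem.List.pyGetD cardPoints (-i) 0 - PySem.List.pyGetD cardPoints (k - i) 0
      (cur, max st.2 cur)) (cur0, cur0)
  res.2

-- ===== PRECONDITION & SPEC =====
-- Pre_ restricts to the problem's natural domain 0 ≤ k ≤ len: A raises IndexError for k > len,
-- and for k < 0 its min-loop is empty so it returns total - 0x7fffffff, an artefact of the sentinel.
def Pre_maxScoreAnother (cardPoints : List Int) (k : Int) : Prop :=
  0 ≤ k ∧ k ≤ (cardPoints.length : Int)
instance (cardPoints : List Int) (k : Int) : Decidable (Pre_maxScoreAnother cardPoints k) := by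
  unfold Pre_maxScoreAnother; infer_instance
def pvWitness_maxScoreAnother : List Int × Int := ([1, 2, 3], 2)

-- When 0 ≤ k < len, k ≠ 1 and every complement window of length len-k sums to more than 0x7fffffff,
-- A's sentinel is never beaten and A returns total - 0x7fffffff; B returns the true maximum taken
-- sum, which is the intended value.
def D_maxScoreAnother (cardPoints : List Int) (k : Int) : Prop :=
  0 ≤ k ∧ k < (cardPoints.length : Int) ∧ k ≠ 1 ∧
    ∀ j ∈ List.range (k.toNat + 1),
      2147483647 < (((cardPoints.drop j).take (cardPoints.length - k.toNat)).sum)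
instance (cardPoints : List Int) (k : Int) : Decidable (D_maxScoreAnother cardPoints k) := by
  unfold D_maxScoreAnother; infer_instance

def Spec_maxScoreAnother (cardPoints : List Int) (k : Int) (out : Int) : Prop :=
  ¬ D_maxScoreAnother cardPoints k → out = maxScoreAnother_alt cardPoints k
instance (cardPoints : List Int) (k : Int) (out : Int) : Decidable (Spec_maxScoreAnother cardPoints k out) := by
  unfold Spec_maxScoreAnother; infer_instance

def pvDiffWitness_maxScoreAnother : List Int × Int := ([2147483648], 0)
def pvDiffWitnessOut_maxScoreAnother : Int × Int := (1, 0)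

-- ===== CLAIM (what is proved, stated in full; the proofs are below) =====
def Claim_unchanged_maxScoreAnother : Prop := ∀ (cardPoints : List Int) (k : Int), Dom_maxScoreAnother cardPoints k → Pre_maxScoreAnother cardPoints k → Spec_maxScoreAnother cardPoints k (maxScoreAnother cardPoints k)
def Claim_changed_maxScoreAnother : Prop := Dom_maxScoreAnother (pvDiffWitness_maxScoreAnother.1) (pvDiffWitness_maxScoreAnother.2) ∧ Pre_maxScoreAnother (pvDiffWitness_maxScoreAnother.1) (pvDiffWitness_maxScoreAnother.2) ∧ D_maxScoreAnother (pvDiffWitness_maxScoreAnother.1) (pvDiffWitness_maxScoreAnother.2) ∧ maxScoreAnother (pvDiffWitness_maxScoreAnother.1) (pvDiffWitness_maxScoreAnother.2) = pvDiffWitnessOut_maxScoreAnother.1 ∧ maxScoreAnother_alt (pvDiffWitness_maxScoreAnother.1) (pvDiffWitness_maxScoreAnother.2) = pvDiffWitnessOut_maxScoreAnother.2 ∧ pvDiffWitnessOut_maxScoreAnother.1 ≠ pvDiffWitnessOut_maxScoreAnother.2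
def Claim_exact_maxScoreAnother : Prop := ∀ (cardPoints : List Int) (k : Int), Dom_maxScoreAnother cardPoints k → Pre_maxScoreAnother cardPoints k → D_maxScoreAnother cardPoints k → maxScoreAnother cardPoints k ≠ maxScoreAnother_alt cardPoints k

-- ===== LEMMAS AND PROOFS =====

-- W cp K j = sum of the complement window of length (len-K) starting at j
def pvW (cp : List Int) (K j : Nat) : Int := ((cp.drop j).take (cp.length - K)).sum
-- S cp K i = sum of the i right-taken and (K-i) left-taken cards
def pvS (cp : List Int) (K i : Nat) : Int := (cp.take (K - i)).sum + (cp.drop (cp.length - i)).sum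
-- running minimum of windows 0..j (A's scan order)
def pvWmin (cp : List Int) (K : Nat) : Nat → Int
  | 0 => pvW cp K 0
  | j + 1 => min (pvWmin cp K j) (pvW cp K (j + 1))
-- running maximum of splits 0..j (B's scan order)
def pvSmax (cp : List Int) (K : Nat) : Nat → Int
  | 0 => pvS cp K 0
  | j + 1 => max (pvSmax cp K j) (pvS cp K (j + 1))
-- running minimum of windows K, K-1, ..., K-j
def pvRWmin (cp : List Int) (K : Nat) : Nat → Int
  | 0 => pvW cp K K
  | j + 1 => min (pvRWmin cp K j) (pvW cp K (K - (j + 1)))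


theorem pv_split (cp : List Int) (j m : Nat) (_h : j + m ≤ cp.length) :
    (cp.take j).sum + ((cp.drop j).take m).sum + (cp.drop (j + m)).sum = cp.sum := by
  have h1 : cp = cp.take j ++ cp.drop j := (List.take_append_drop j cp).symm
  have h2 : ((cp.drop j).drop m) = cp.drop (j + m) := by
    rw [List.drop_drop, Nat.add_comm]
  calc (cp.take j).sum + ((cp.drop j).take m).sum + (cp.drop (j + m)).sum
      = (cp.take j).sum + (((cp.drop j).take m).sum + ((cp.drop j).drop m).sum) := by
        rw [h2]; ring
    _ = (cp.take j).sum + (cp.drop j).sum := by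
        rw [← List.sum_append, List.take_append_drop]
    _ = cp.sum := by rw [← List.sum_append, List.take_append_drop]

theorem pv_S_eq (cp : List Int) (K i : Nat) (hK : K ≤ cp.length) (hi : i ≤ K) :
    pvS cp K i = cp.sum - pvW cp K (K - i) := by
  have h := pv_split cp (K - i) (cp.length - K) (by omega)
  have he : K - i + (cp.length - K) = cp.length - i := by omega
  rw [he] at h
  unfold pvS pvW
  omega

theorem pv_take_succ_sum (cp : List Int) (m : Nat) (h : m < cp.length) :
    (cp.take (m + 1)).sum = (cp.take m).sum + cp[m] := by
  exact List.sum_take_succ cp m h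

theorem pv_S_step (cp : List Int) (K j : Nat) (hK : K ≤ cp.length) (hj : j + 1 ≤ K) :
    pvS cp K (j + 1) = pvS cp K j + cp[cp.length - (j + 1)]'(by omega)
      - cp[K - (j + 1)]'(by omega) := by
  unfold pvS
  have h1 : K - j = (K - (j + 1)) + 1 := by omega
  have h2 := pv_take_succ_sum cp (K - (j + 1)) (by omega)
  have h3 : cp.drop (cp.length - (j + 1))
      = cp[cp.length - (j + 1)]'(by omega) :: cp.drop (cp.length - j) := by
    have h4 := List.drop_eq_getElem_cons (l := cp) (i := cp.length - (j + 1)) (by omega)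
    have h5 : cp.length - (j + 1) + 1 = cp.length - j := by omega
    rw [h5] at h4
    exact h4
  rw [h1, h2, h3, List.sum_cons]
  ring

theorem pv_B_eq (cp : List Int) (k : Int) (K : Nat) (hk : k = (K : Int)) (hK : K ≤ cp.length) :
    maxScoreAnother_alt cp k = pvSmax cp K K := by
  subst hk
  unfold maxScoreAnother_alt
  have hcur0 : (PySem.List.slice cp none (some ((K : Nat) : Int))).sum = pvS cp K 0 := by
    rw [PySem.List.slice_to_natCast]
    simp [pvS, List.drop_length]
  rw [hcur0]
  have hr : PySem.List.pyRange 1 (((K : Nat) : Int) + 1) 1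
      = (List.range K).map (fun (t : Nat) => 1 + (t : Int)) := by
    rw [PySem.List.pyRange_one]
    norm_num
  rw [hr]
  simp only [List.foldl_map]
  have inv : ∀ j, j ≤ K →
      (List.range j).foldl
        (fun (st : Int × Int) (t : Nat) =>
          let cur := st.1 + PySem.List.pyGetD cp (-(1 + (t : Int))) 0
              - PySem.List.pyGetD cp (((K : Nat) : Int) - (1 + (t : Int))) 0
          (cur, max st.2 cur))
        (pvS cp K 0, pvS cp K 0) = (pvS cp K j, pvSmax cp K j) := by
    intro j
    induction j with
    | zero => intro _; simp [pvSmax]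
    | succ j ih =>
      intro hj
      rw [List.range_succ, List.foldl_append, ih (by omega)]
      simp only [List.foldl_cons, List.foldl_nil]
      have hneg : PySem.List.pyGetD cp (-(1 + (j : Int))) 0
          = cp[cp.length - (j + 1)]'(by omega) := by
        have h1 : (-(1 + (j : Int))) = -(((j + 1 : Nat) : Int)) := by push_cast; ring
        rw [h1]
        exact PySem.List.pyGetD_neg_natCast cp (j + 1) 0 (by omega) (by omega)
      have hpos : PySem.List.pyGetD cp (((K : Nat) : Int) - (1 + (j : Int))) 0
          = cp[K - (j + 1)]'(by omega) := by
        have h1 : (((K : Nat) : Int) - (1 + (j : Int))) = ((K - (j + 1) : Nat) : Int) := by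
          push_cast [Nat.cast_sub (by omega : j + 1 ≤ K)]; ring
        rw [h1, PySem.List.pyGetD_natCast, List.getD_eq_getElem _ _ (by omega)]
      have hstep := pv_S_step cp K j hK hj
      simp only [hneg, hpos]
      rw [pvSmax, ← hstep]
  rw [inv K (le_refl K)]

theorem pv_preSum (cp : List Int) :
    (PySem.List.pyRange 0 (cp.length : Int) 1).foldl
      (fun ps i => ps ++ [PySem.List.pyGetD ps (-1) 0 + PySem.List.pyGetD cp i 0]) [0]
    = (List.range (cp.length + 1)).map (fun j => (cp.take j).sum) := by
  rw [PySem.List.pyRange_zero_nat, List.foldl_map]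
  have inv : ∀ m, m ≤ cp.length →
      (List.range m).foldl
        (fun ps (t : Nat) => ps ++ [PySem.List.pyGetD ps (-1) 0 + PySem.List.pyGetD cp ((t : Nat) : Int) 0]) [0]
      = (List.range (m + 1)).map (fun j => (cp.take j).sum) := by
    intro m
    induction m with
    | zero => intro _; simp
    | succ m ih =>
      intro hm
      rw [List.range_succ, List.foldl_append, ih (by omega)]
      simp only [List.foldl_cons, List.foldl_nil]
      have hsplit : (List.range (m + 1)).map (fun j => (cp.take j).sum)
          = (List.range m).map (fun j => (cp.take j).sum) ++ [(cp.take m).sum] := by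
        rw [List.range_succ, List.map_append]; simp
      rw [hsplit, PySem.List.pyGetD_neg_one_append_singleton,
        PySem.List.pyGetD_natCast, List.getD_eq_getElem _ _ (by omega)]
      have hss := List.sum_take_succ cp m (by omega)
      rw [List.range_succ (n := m + 1), List.map_append]
      simp [hss]
      rw [hsplit]
      simp
  exact inv cp.length le_rfl

theorem pv_min_fold (cp : List Int) (K : Nat) (c : Int) (j : Nat) :
    (List.range (j + 1)).foldl
      (fun m t => if pvW cp K t < m then pvW cp K t else m) c
    = min c (pvWmin cp K j) := by
  induction j with
  | zero =>
    simp only [List.range_succ, List.range_zero, List.nil_append,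
      List.foldl_cons, List.foldl_nil, List.foldl_append, pvWmin]
    rw [min_def]; split_ifs <;> omega
  | succ j ih =>
    rw [List.range_succ, List.foldl_append, ih]
    simp only [List.foldl_cons, List.foldl_nil]
    rw [pvWmin, min_def, min_def, min_def]
    split_ifs <;> omega

theorem pv_W_val (cp : List Int) (K t : Nat) (_ht : t ≤ K) (_hK : K ≤ cp.length) :
    (cp.take (cp.length - K + t)).sum - (cp.take t).sum = pvW cp K t := by
  have h1 : cp.length - K + t = t + (cp.length - K) := by omega
  rw [h1, List.take_add, List.sum_append]
  unfold pvW
  ring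

theorem pv_A_else (cp : List Int) (k : Int) (K : Nat) (hk : k = (K : Int)) (hK : K < cp.length)
    (h1 : k ≠ 1) :
    maxScoreAnother cp k = cp.sum - min 2147483647 (pvWmin cp K K) := by
  subst hk
  unfold maxScoreAnother
  rw [if_neg (by push_cast; omega : ¬ ((cp.length : Int) = ((K : Nat) : Int))), if_neg h1]
  simp only [pv_preSum]
  have hw : ∀ t : Nat, t ≤ cp.length →
      PySem.List.pyGetD ((List.range (cp.length + 1)).map (fun j => (cp.take j).sum)) ((t : Nat) : Int) 0
        = (cp.take t).sum := by
    intro t ht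
    rw [PySem.List.pyGetD_natCast, List.getD_eq_getElem _ _ (by simp; omega)]
    simp
  have hr : PySem.List.pyRange ((cp.length : Int) - ((K : Nat) : Int)) ((cp.length : Int) + 1) 1
      = (List.range (K + 1)).map (fun (t : Nat) => ((cp.length : Int) - ((K : Nat) : Int)) + (t : Int)) := by
    rw [PySem.List.pyRange_one]
    have : ((cp.length : Int) + 1 - ((cp.length : Int) - ((K : Nat) : Int))).toNat = K + 1 := by omega
    rw [this]
  rw [hr, List.foldl_map]
  have hcongr : ∀ (m : Int), ∀ t ∈ List.range (K + 1),
      (fun (m : Int) (t : Nat) =>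
        if PySem.List.pyGetD ((List.range (cp.length + 1)).map (fun j => (cp.take j).sum))
              (((cp.length : Int) - ((K : Nat) : Int)) + (t : Int)) 0
            - PySem.List.pyGetD ((List.range (cp.length + 1)).map (fun j => (cp.take j).sum))
              (((cp.length : Int) - ((K : Nat) : Int)) + (t : Int) - (cp.length : Int) + ((K : Nat) : Int)) 0 < m then
          PySem.List.pyGetD ((List.range (cp.length + 1)).map (fun j => (cp.take j).sum))
              (((cp.length : Int) - ((K : Nat) : Int)) + (t : Int)) 0
            - PySem.List.pyGetD ((List.range (cp.length + 1)).map (fun j => (cp.take j).sum))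
              (((cp.length : Int) - ((K : Nat) : Int)) + (t : Int) - (cp.length : Int) + ((K : Nat) : Int)) 0
        else m) m t
      = (fun (m : Int) (t : Nat) => if pvW cp K t < m then pvW cp K t else m) m t := by
    intro m t hmem
    have ht : t ≤ K := by have := List.mem_range.mp hmem; omega
    beta_reduce
    have hi1 : ((cp.length : Int) - ((K : Nat) : Int)) + (t : Int)
        = (((cp.length - K + t : Nat)) : Int) := by
      push_cast [Nat.cast_sub (le_of_lt hK)]; ring
    have hi2 : ((cp.length : Int) - ((K : Nat) : Int)) + (t : Int) - (cp.length : Int) + ((K : Nat) : Int)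
        = ((t : Nat) : Int) := by ring
    rw [hi2, hi1, hw (cp.length - K + t) (by omega), hw t (by omega),
      pv_W_val cp K t ht hK.le]
  rw [PySem.List.foldl_congr_mem _ _ _ _ hcongr, pv_min_fold]
  have hlast : (List.range (cp.length + 1)).map (fun j => (cp.take j).sum)
      = (List.range cp.length).map (fun j => (cp.take j).sum) ++ [(cp.take cp.length).sum] := by
    rw [List.range_succ, List.map_append]; simp
  rw [hlast, PySem.List.pyGetD_neg_one_append_singleton]
  simp [List.take_length]

theorem pv_Smax_eq (cp : List Int) (K : Nat) (hK : K ≤ cp.length) (j : Nat) (hj : j ≤ K) :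
    pvSmax cp K j = cp.sum - pvRWmin cp K j := by
  induction j with
  | zero => simpa [pvSmax, pvRWmin] using pv_S_eq cp K 0 hK (by omega)
  | succ j ih =>
    have hs := pv_S_eq cp K (j+1) hK hj
    unfold pvSmax pvRWmin
    rw [ih (by omega), hs]
    rcases le_total (pvRWmin cp K j) (pvW cp K (K - (j+1))) with h | h
    · rw [min_eq_left h, max_eq_left (by omega)]
    · rw [min_eq_right h, max_eq_right (by omega)]

theorem pv_Wmin_le (cp : List Int) (K j i : Nat) (h : i ≤ j) : pvWmin cp K j ≤ pvW cp K i := by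
  induction j with
  | zero => simp_all [pvWmin]
  | succ j ih =>
    rcases Nat.lt_or_ge i (j+1) with hlt | hge
    · exact le_trans (min_le_left _ _) (ih (by omega))
    · have : i = j + 1 := by omega
      subst this; exact min_le_right _ _

theorem pv_Wmin_exists (cp : List Int) (K j : Nat) : ∃ i ≤ j, pvWmin cp K j = pvW cp K i := by
  induction j with
  | zero => exact ⟨0, le_refl _, rfl⟩
  | succ j ih =>
    rcases ih with ⟨i, hi, he⟩
    rcases le_total (pvWmin cp K j) (pvW cp K (j+1)) with h | h
    · exact ⟨i, by omega, by rw [pvWmin, min_eq_left h, he]⟩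
    · exact ⟨j+1, le_refl _, by rw [pvWmin, min_eq_right h]⟩

theorem pv_RWmin_le (cp : List Int) (K j i : Nat) (h1 : K - j ≤ i) (h2 : i ≤ K) :
    pvRWmin cp K j ≤ pvW cp K i := by
  induction j with
  | zero =>
    have : i = K := by omega
    subst this; simp [pvRWmin]
  | succ j ih =>
    rcases Nat.lt_or_ge i (K - j) with hlt | hge
    · have : i = K - (j + 1) := by omega
      subst this; exact min_le_right _ _
    · exact le_trans (min_le_left _ _) (ih hge)

theorem pv_RWmin_exists (cp : List Int) (K j : Nat) :
    ∃ i, K - j ≤ i ∧ i ≤ K ∧ pvRWmin cp K j = pvW cp K i := by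
  induction j with
  | zero => exact ⟨K, by omega, le_refl _, rfl⟩
  | succ j ih =>
    rcases ih with ⟨i, h1, h2, he⟩
    rcases le_total (pvRWmin cp K j) (pvW cp K (K - (j+1))) with h | h
    · exact ⟨i, by omega, h2, by rw [pvRWmin, min_eq_left h, he]⟩
    · exact ⟨K - (j+1), by omega, by omega, by rw [pvRWmin, min_eq_right h]⟩

theorem pv_Wmin_eq_RWmin (cp : List Int) (K : Nat) : pvWmin cp K K = pvRWmin cp K K := by
  rcases pv_Wmin_exists cp K K with ⟨i, hi, he⟩
  rcases pv_RWmin_exists cp K K with ⟨i', h1, h2, he'⟩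
  have ha : pvWmin cp K K ≤ pvRWmin cp K K := by
    rw [he']; exact pv_Wmin_le cp K K i' h2
  have hb : pvRWmin cp K K ≤ pvWmin cp K K := by
    rw [he]; exact pv_RWmin_le cp K K i (by omega) hi
  omega

-- ===== VERDICT (by name: the statement is the Claim_ definition above) =====
theorem maxScoreAnother_spec : Claim_unchanged_maxScoreAnother := by
  unfold Claim_unchanged_maxScoreAnother
  intro cp k _ hpre
  unfold Spec_maxScoreAnother
  intro hnd
  obtain ⟨hk0, hkn⟩ := hpre
  set K := k.toNat with hKdef
  have hk : k = (K : Int) := by omega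
  have hKlen : K ≤ cp.length := by omega
  by_cases heq : (cp.length : Int) = k
  · have hA : maxScoreAnother cp k = cp.sum := by
      unfold maxScoreAnother; rw [if_pos heq]
    have hB := pv_B_eq cp k K hk hKlen
    have hKn : K = cp.length := by omega
    have hW0 : ∀ i, pvW cp K i = 0 := by
      intro i; unfold pvW; rw [hKn]; simp
    have hsm := pv_Smax_eq cp K hKlen K le_rfl
    rcases pv_RWmin_exists cp K K with ⟨i, _, _, he⟩
    rw [hA, hB, hsm, he, hW0]; ring
  · by_cases hk1 : k = 1
    · have hlen1 : 1 ≤ cp.length := by omega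
      have hlen : 1 < cp.length := by
        rcases Nat.lt_or_ge 1 cp.length with h | h
        · exact h
        · exfalso; apply heq; omega
      have hK1 : K = 1 := by omega
      unfold maxScoreAnother
      rw [if_neg heq, if_pos hk1]
      have hS0 : pvS cp 1 0 = cp[0]'(by omega) := by
        unfold pvS
        have := List.sum_take_succ cp 0 (by omega)
        simp at this ⊢
        simp [this]
      have hS1 : pvS cp 1 1 = cp[cp.length - 1]'(by omega) := by
        unfold pvS
        have hd := List.drop_eq_getElem_cons (l := cp) (i := cp.length - 1) (by omega)
        have h5 : cp.length - 1 + 1 = cp.length := by omega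
        rw [h5] at hd
        simp [hd, List.drop_length]
      have hg0 : PySem.List.pyGetD cp 0 0 = pvS cp 1 0 := by
        rw [PySem.List.pyGetD_zero, List.getD_eq_getElem _ _ (by omega)]
        exact hS0.symm
      have hgl : PySem.List.pyGetD cp (-1) 0 = pvS cp 1 1 := by
        have h1 : (-1 : Int) = -(((1 : Nat)) : Int) := by norm_num
        rw [h1, PySem.List.pyGetD_neg_natCast cp 1 0 (by omega) (by omega)]
        exact hS1.symm
      show (if PySem.List.pyGetD cp 0 0 ≥ PySem.List.pyGetD cp (-1) 0 then
          PySem.List.pyGetD cp 0 0 else PySem.List.pyGetD cp (-1) 0)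
        = maxScoreAnother_alt cp k
      rw [hg0, hgl, pv_B_eq cp k K hk hKlen, hK1, pvSmax, pvSmax]
      simp only [Nat.zero_add]
      rw [max_def]; split_ifs <;> omega
    · have hKlt : K < cp.length := by
        rcases Nat.lt_or_ge K cp.length with h | h
        · exact h
        · exfalso; apply heq; omega
      rw [pv_A_else cp k K hk hKlt hk1, pv_B_eq cp k K hk hKlen,
        pv_Smax_eq cp K hKlen K le_rfl, ← pv_Wmin_eq_RWmin]
      have hD : ∃ j, j ≤ K ∧ pvW cp K j ≤ 2147483647 := by
        unfold D_maxScoreAnother at hnd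
        push_neg at hnd
        rcases hnd hk0 (by omega) hk1 with ⟨j, hj, hle⟩
        exact ⟨j, by have := List.mem_range.mp hj; omega, by unfold pvW; omega⟩
      rcases hD with ⟨j, hj, hle⟩
      have hW := pv_Wmin_le cp K K j hj
      have hmin : min 2147483647 (pvWmin cp K K) = pvWmin cp K K :=
        min_eq_right (by omega)
      rw [hmin]

theorem maxScoreAnother_changed : Claim_changed_maxScoreAnother := by
  unfold Claim_changed_maxScoreAnother; decide

theorem maxScoreAnother_tight : Claim_exact_maxScoreAnother := by
  unfold Claim_exact_maxScoreAnother
  intro cp k _ hpre hD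
  obtain ⟨hk0, hkn⟩ := hpre
  obtain ⟨_, hklt, hk1, hwin⟩ := hD
  set K := k.toNat with hKdef
  have hk : k = (K : Int) := by omega
  have hKlt : K < cp.length := by omega
  rw [pv_A_else cp k K hk hKlt hk1, pv_B_eq cp k K hk (by omega),
    pv_Smax_eq cp K (by omega) K le_rfl, ← pv_Wmin_eq_RWmin]
  have hall : ∀ j, j ≤ K → 2147483647 < pvW cp K j := by
    intro j hj
    have := hwin j (List.mem_range.mpr (by omega))
    unfold pvW; omega
  rcases pv_Wmin_exists cp K K with ⟨i, hi, he⟩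
  have h1 : 2147483647 < pvWmin cp K K := he ▸ hall i hi
  have h2 : min 2147483647 (pvWmin cp K K) = 2147483647 := min_eq_left (by omega)
  rw [h2]
  omega
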